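-- pv_equiv track=rewrite | github.com/zicots7/SMS_IVR_Driver_Passenger_Registration-Using-Flask | passenger_reg.py | rank_address_results
-- ===== SOURCE A (Python) =====
-- def rank_address_results(results, original_query):
--     """Rank geocoding results by relevance"""
--     def calculate_relevance_score(result, query):
--         formatted_address = result['formatted_address'].lower()
--         query = query.lower()
--
--         # Exact match gets highest score
--         if query in formatted_address:
--             return 100
--
--         # Partial match scoring
--         words_matched = sum(word in formatted_address for word in query.split())
--         return words_matched * 10
--
--     # Sort results by relevance score
--     return sorted(
--         results,
--         key=lambda r: calculate_relevance_score(r, original_query),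
--         reverse=True
--     )
-- ===== SOURCE B (Python) =====
-- def rank_address_results(results, original_query):
--     """Rank geocoding results by relevance (bucket grouping instead of a comparison sort)"""
--     def calculate_relevance_score(result, query):
--         formatted_address = result['formatted_address'].lower()
--         query = query.lower()
--
--         # Exact match gets highest score
--         if query in formatted_address:
--             return 100
--
--         # Partial match scoring
--         words_matched = sum(word in formatted_address for word in query.split())
--         return words_matched * 10
--
--     # Group results into score buckets in one pass (insertion order kept per bucket)
--     buckets = {}
--     for r in results:
--         s = calculate_relevance_score(r, original_query)
--         buckets[s] = buckets.get(s, []) + [r]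
--
--     # Concatenate buckets by strictly descending score
--     out = []
--     for s in sorted(buckets, reverse=True):
--         out += buckets[s]
--     return out
-- ===== Notes on version B (the rewrite author's own statement) =====
-- stated objective: alternative
-- what changed: Replaces the stable key-based comparison sort with a single-pass grouping into a score->bucket dict followed by concatenating buckets in descending score order (ties keep insertion order, matching the stable sort).
import Mathlib
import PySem

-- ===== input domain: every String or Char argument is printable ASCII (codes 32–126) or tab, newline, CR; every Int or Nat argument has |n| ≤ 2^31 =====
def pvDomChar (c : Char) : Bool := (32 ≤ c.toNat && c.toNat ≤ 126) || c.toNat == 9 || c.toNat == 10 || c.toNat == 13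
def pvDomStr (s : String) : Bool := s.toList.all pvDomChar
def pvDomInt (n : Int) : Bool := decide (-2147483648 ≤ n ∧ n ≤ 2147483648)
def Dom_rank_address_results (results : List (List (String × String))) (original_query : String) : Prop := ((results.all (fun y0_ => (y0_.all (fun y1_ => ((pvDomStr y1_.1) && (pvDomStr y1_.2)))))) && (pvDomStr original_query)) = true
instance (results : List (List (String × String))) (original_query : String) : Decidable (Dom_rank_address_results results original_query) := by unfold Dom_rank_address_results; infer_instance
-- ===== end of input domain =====

-- B groups results into score buckets in one pass and concatenates buckets by descending score,
-- instead of A's comparison sort with a key (objective: alternative; same observable result).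


-- ===== PORT A =====
-- inner helper calculate_relevance_score (identical in A and B; the lookup's `getD ""` arm is
-- unreachable under Pre_, which requires the key to be present)
def pvScore (result : List (String × String)) (query : String) : Int :=
  let formatted_address := PySem.Str.lower (((PySem.Dict.mk result).get? "formatted_address").getD "")
  let q := PySem.Str.lower query
  if PySem.Str.isIn q formatted_address then 100
  else
    let words_matched : Int :=
      ((PySem.Str.split₀ q).map (fun word => if PySem.Str.isIn word formatted_address then (1 : Int) else 0)).sum
    words_matched * 10

def rank_address_results (results : List (List (String × String))) (original_query : String) : List (List (String × String)) :=
  PySem.List.sorted results (fun r => pvScore r original_query) true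

-- ===== PORT B =====
def rank_address_results_alt (results : List (List (String × String))) (original_query : String) : List (List (String × String)) :=
  let buckets := results.foldl (fun d r => d.modify (pvScore r original_query) [] (fun l => l ++ [r])) PySem.Dict.empty
  (PySem.List.sorted buckets.keys (fun s => s) true).foldl (fun out s => out ++ buckets.getD s []) []

-- ===== PRECONDITION & SPEC =====
-- Pre_ excludes exactly the inputs where some result dict lacks the key 'formatted_address',
-- on which the Python A raises KeyError.
def Pre_rank_address_results (results : List (List (String × String))) (original_query : String) : Prop :=
  (results.all (fun r => (r.map Prod.fst).contains "formatted_address")) = true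
instance (results : List (List (String × String))) (original_query : String) : Decidable (Pre_rank_address_results results original_query) := by unfold Pre_rank_address_results; infer_instance

def pvWitness_rank_address_results : (List (List (String × String))) × String :=
  ([[("formatted_address", "1 Main St, Springfield")], [("formatted_address", "2 Oak Ave")]], "main st")

def Spec_rank_address_results (results : List (List (String × String))) (original_query : String) (out : List (List (String × String))) : Prop := out = rank_address_results_alt results original_query
instance (results : List (List (String × String))) (original_query : String) (out : List (List (String × String))) : Decidable (Spec_rank_address_results results original_query out) := by unfold Spec_rank_address_results; infer_instance

-- ===== CLAIM (what is proved, stated in full; the proofs are below) =====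
def Claim_equal_rank_address_results : Prop := ∀ (results : List (List (String × String))) (original_query : String), Dom_rank_address_results results original_query → Pre_rank_address_results results original_query → Spec_rank_address_results results original_query (rank_address_results results original_query)

-- ===== LEMMAS AND PROOFS =====

-- grouping of a list by a descending key list: the bucket of each key, concatenated
def pvGroups {α : Type} (key : α → Int) (ks : List Int) (p : List α) : List α :=
  ks.flatMap (fun s => p.filter (fun r => key r == s))

theorem pv_insertBy_append {α : Type} (before : α → α → Bool) (x : α) (L1 L2 : List α)
    (h : ∀ y ∈ L1, before x y = false) :
    PySem.List.insertBy before x (L1 ++ L2) = L1 ++ PySem.List.insertBy before x L2 := by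
  induction L1 with
  | nil => simp
  | cons y t ih =>
    have hy : before x y = false := h y (by simp)
    simp only [List.cons_append, PySem.List.insertBy, hy]
    simp only [Bool.false_eq_true, if_false]
    exact congrArg (y :: ·) (ih (fun z hz => h z (by simp [hz])))

theorem pv_insertBy_all_before {α : Type} (before : α → α → Bool) (x : α) (L : List α)
    (h : ∀ z ∈ L, before x z = true) :
    PySem.List.insertBy before x L = x :: L := by
  cases L with
  | nil => rfl
  | cons z t => simp [PySem.List.insertBy, h z (by simp)]

theorem pv_insert_group {α : Type} (key : α → Int) (ks : List Int)
    (hks : ks.Pairwise (· > ·)) (x : α) (hx : key x ∈ ks) (p : List α) :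
    PySem.List.insertBy (fun a b => decide (key b < key a)) x (pvGroups key ks p)
      = pvGroups key ks (p ++ [x]) := by
  obtain ⟨P, S, rfl⟩ := List.append_of_mem hx
  rw [List.pairwise_append] at hks
  obtain ⟨hP, hS', hcross⟩ := hks
  rw [List.pairwise_cons] at hS'
  obtain ⟨hS, _⟩ := hS'
  have hPgt : ∀ t ∈ P, key x < t := fun t ht => hcross t ht (key x) (by simp)
  have hkeyGP : ∀ y ∈ pvGroups key P p, key x < key y := by
    intro y hy
    simp only [pvGroups, List.mem_flatMap, List.mem_filter] at hy
    obtain ⟨t, ht, _, hky⟩ := hy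
    have : key y = t := by simpa using hky
    exact this ▸ hPgt t ht
  have hfilt : ∀ y ∈ p.filter (fun r => key r == key x), key y = key x := by
    intro y hy
    have := (List.mem_filter.mp hy).2
    simpa using this
  have step1 : pvGroups key (P ++ key x :: S) p
      = (pvGroups key P p ++ p.filter (fun r => key r == key x)) ++ pvGroups key S p := by
    simp [pvGroups, List.flatMap_append]
  rw [step1]
  rw [pv_insertBy_append _ x _ _ (by
    intro y hy
    rcases List.mem_append.mp hy with h1 | h2
    · simp [not_lt.mpr (le_of_lt (hkeyGP y h1))]
    · simp [hfilt y h2])]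
  rw [pv_insertBy_all_before _ x _ (by
    intro z hz
    simp only [pvGroups, List.mem_flatMap, List.mem_filter] at hz
    obtain ⟨t, ht, _, hkz⟩ := hz
    have hzt : key z = t := by simpa using hkz
    simp [hzt ▸ hS t ht])]
  have hbP : ∀ t ∈ P, p.filter (fun r => key r == t) ++ [x].filter (fun r => key r == t)
      = p.filter (fun r => key r == t) := by
    intro t ht
    have : (key x == t) = false := by simp [ne_of_lt (hPgt t ht)]
    simp [List.filter, this]
  have hbS : ∀ t ∈ S, p.filter (fun r => key r == t) ++ [x].filter (fun r => key r == t)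
      = p.filter (fun r => key r == t) := by
    intro t ht
    have : (key x == t) = false := by simp [ne_of_gt (hS t ht)]
    simp [List.filter, this]
  simp only [pvGroups, List.flatMap_append, List.flatMap_cons, List.filter_append]
  rw [List.flatMap_congr (fun t ht => hbP t ht), List.flatMap_congr (fun t ht => hbS t ht)]
  simp [List.filter]

theorem pv_foldl_insertBy {α : Type} (key : α → Int) (ks : List Int)
    (hks : ks.Pairwise (· > ·)) (xs : List α) (hmem : ∀ x ∈ xs, key x ∈ ks) :
    ∀ p, xs.foldl (fun acc x => PySem.List.insertBy (fun a b => decide (key b < key a)) x acc)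
        (pvGroups key ks p) = pvGroups key ks (p ++ xs) := by
  induction xs with
  | nil => intro p; simp
  | cons x t ih =>
    intro p
    simp only [List.foldl_cons]
    rw [pv_insert_group key ks hks x (hmem x (by simp)) p]
    rw [ih (fun z hz => hmem z (by simp [hz])) (p ++ [x])]
    simp

theorem pv_sorted_eq_groups {α : Type} (key : α → Int) (xs : List α) :
    PySem.List.sorted xs key true
      = pvGroups key (PySem.List.sorted (PySem.Set.ofList (xs.map key)) (fun s => s) true) xs := by
  set ks := PySem.List.sorted (PySem.Set.ofList (xs.map key)) (fun s => s) true with hksdef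
  have hnd : ks.Nodup :=
    (PySem.List.sorted_perm (PySem.Set.ofList (xs.map key)) (fun s => s) true).symm.nodup
      (PySem.Set.nodup_ofList (xs.map key))
  have hge : ks.Pairwise (fun a b => b ≤ a) := PySem.List.sorted_pairwise_rev _ _
  have hgt : ks.Pairwise (· > ·) := by
    have := hge.and hnd
    exact this.imp (fun h => lt_of_le_of_ne h.1 (Ne.symm h.2))
  have hmem : ∀ x ∈ xs, key x ∈ ks := by
    intro x hx
    rw [hksdef, PySem.List.mem_sorted, PySem.Set.mem_ofList]
    exact List.mem_map_of_mem hx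
  have h0 : pvGroups key ks [] = [] := by simp [pvGroups]
  rw [PySem.List.sorted_rev_eq_foldl_insertBy]
  have := pv_foldl_insertBy key ks hgt xs hmem []
  rw [h0] at this
  simpa using this

theorem pv_alt_eq_groups (results : List (List (String × String))) (q : String) :
    rank_address_results_alt results q
      = pvGroups (fun r => pvScore r q)
          (PySem.List.sorted (PySem.Set.ofList (results.map (fun r => pvScore r q))) (fun s => s) true)
          results := by
  unfold rank_address_results_alt
  have hfold : results.foldl (fun d r => d.modify (pvScore r q) [] (fun l => l ++ [r])) PySem.Dict.empty
      = (results.map (fun r => (pvScore r q, r))).foldl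
          (fun d p => d.modify p.1 [] (fun l => l ++ [p.2])) PySem.Dict.empty := by
    rw [List.foldl_map]
  have hkeys : (results.foldl (fun d r => d.modify (pvScore r q) [] (fun l => l ++ [r]))
      PySem.Dict.empty).keys = PySem.Set.ofList (results.map (fun r => pvScore r q)) := by
    rw [PySem.Dict.keys_foldl_modify_key results (fun r => pvScore r q) [] (fun _ r => fun l => l ++ [r])]
    simp [PySem.Set.update_nil_left, PySem.Dict.keys_empty]
  have hgetD : ∀ s, (results.foldl (fun d r => d.modify (pvScore r q) [] (fun l => l ++ [r]))
      PySem.Dict.empty).getD s [] = results.filter (fun r => pvScore r q == s) := by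
    intro s
    rw [hfold, PySem.Dict.getD_foldl_modify_append]
    simp [List.filter_map, List.map_map, Function.comp_def, PySem.Dict.getD_empty]
  simp only [hkeys, hgetD]
  rw [PySem.List.foldl_append_eq_flatMap]
  simp [pvGroups]

-- ===== VERDICT (by name: the statement is the Claim_ definition above) =====
theorem rank_address_results_spec : Claim_equal_rank_address_results := by
  intro results original_query _ _
  unfold Spec_rank_address_results
  rw [pv_alt_eq_groups results original_query]
  exact pv_sorted_eq_groups (fun r => pvScore r original_query) results
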